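-- pv_equiv track=rewrite | github.com/FrancoAlfano/lab | alumnos/54056-Franco-Alfano/tps/tp2/colors.py | assign_bits_to_colors
-- ===== SOURCE A (Python) =====
-- color_red = 'red'
--
-- color_green = 'green'
--
-- color_blue = 'blue'
--
-- colors_order = [color_red, color_green, color_blue]
--
-- def assign_bits_to_colors(bin_message):
--     color_groups = {
--         color_red: [],
--         color_green: [],
--         color_blue: [],
--     }
--     rgb_position = 0
--
--     #Iteramos el bin_message asignandole red, green y blue
--     #Por cada bit hasta que tenemos 3 mensajes distintos
--     #uno por cada color
--     for bit in bin_message: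
--         color = colors_order[rgb_position]
--         color_groups[color].append(bit)
--         rgb_position += 1
--
--         if rgb_position == len(colors_order):
--             rgb_position = 0
--
--     return color_groups
-- ===== SOURCE B (Python) =====
-- color_red = 'red'
-- color_green = 'green'
-- color_blue = 'blue'
-- colors_order = [color_red, color_green, color_blue]
--
-- def assign_bits_to_colors(bin_message):
--     bits = list(bin_message)
--     return {
--         color_red: [b for i, b in enumerate(bits) if i % 3 == 0],
--         color_green: [b for i, b in enumerate(bits) if i % 3 == 1],
--         color_blue: [b for i, b in enumerate(bits) if i % 3 == 2],
--     }
-- ===== Notes on version B (the rewrite author's own statement) =====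
-- stated objective: idiomatic
-- what changed: Replaces the single round-robin pass with a rotating position counter over a mutable dict by three independent residue-class extractions (filter enumerate(bits) by index mod 3) building the result dict in one expression.
import Mathlib
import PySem

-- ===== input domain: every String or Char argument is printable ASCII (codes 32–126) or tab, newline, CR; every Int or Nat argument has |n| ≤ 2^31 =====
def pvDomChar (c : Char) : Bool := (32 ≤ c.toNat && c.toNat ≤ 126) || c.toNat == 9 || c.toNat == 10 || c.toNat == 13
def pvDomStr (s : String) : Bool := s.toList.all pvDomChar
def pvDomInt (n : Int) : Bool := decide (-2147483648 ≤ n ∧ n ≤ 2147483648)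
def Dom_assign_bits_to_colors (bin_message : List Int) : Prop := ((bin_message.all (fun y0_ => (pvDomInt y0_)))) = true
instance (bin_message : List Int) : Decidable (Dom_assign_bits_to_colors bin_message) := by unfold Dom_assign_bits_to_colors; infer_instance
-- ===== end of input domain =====

-- B replaces A's single round-robin pass (rotating position counter + dict mutation)
-- with three independent residue-class extractions by index mod 3 (objective: idiomatic).

-- ===== PORT A =====
def pvColorsOrder : List String := ["red", "green", "blue"]

-- the loop body of A's 'for bit in bin_message' (state: the dict and rgb_position)
def pvStepA (st : PySem.Dict String (List Int) × Int) (bit : Int) :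
    PySem.Dict String (List Int) × Int :=
  -- rgb_position is always 0/1/2 here, so colors_order[rgb_position] never raises; pyGetD "" is exact
  let color := PySem.List.pyGetD pvColorsOrder st.2 ""
  -- color is always a key of the dict, so d[color].append(bit) never raises; modify with default [] is exact
  let d := st.1.modify color [] (fun l => l ++ [bit])
  let p := st.2 + 1
  (d, if p == PySem.List.len pvColorsOrder then 0 else p)

def assign_bits_to_colors (bin_message : List Int) : List (String × List Int) :=
  let color_groups : PySem.Dict String (List Int) :=
    PySem.Dict.ofList [("red", []), ("green", []), ("blue", [])]
  let res := bin_message.foldl pvStepA (color_groups, 0)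
  res.1.items

-- ===== PORT B =====
def pvPick (r : Int) (bits : List Int) : List Int :=
  ((PySem.List.enumerate bits).filter (fun p => PySem.Int.mod p.1 3 == r)).map (·.2)

def assign_bits_to_colors_alt (bin_message : List Int) : List (String × List Int) :=
  let bits := bin_message
  [("red", pvPick 0 bits), ("green", pvPick 1 bits), ("blue", pvPick 2 bits)]

-- ===== PRECONDITION & SPEC =====
def Spec_assign_bits_to_colors (bin_message : List Int) (out : List (String × List Int)) : Prop := out = assign_bits_to_colors_alt bin_message
instance (bin_message : List Int) (out : List (String × List Int)) : Decidable (Spec_assign_bits_to_colors bin_message out) := by unfold Spec_assign_bits_to_colors; infer_instance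

-- ===== CLAIM (what is proved, stated in full; the proofs are below) =====
def Claim_equal_assign_bits_to_colors : Prop := ∀ (bin_message : List Int), Dom_assign_bits_to_colors bin_message → Spec_assign_bits_to_colors bin_message (assign_bits_to_colors bin_message)

-- ===== LEMMAS AND PROOFS =====

-- the dict A's loop maintains, with one list per color
def pvDictOf (r g b : List Int) : PySem.Dict String (List Int) :=
  PySem.Dict.ofList [("red", r), ("green", g), ("blue", b)]

-- B's extraction, generalised to an arbitrary enumeration start
def pvPickF (r s : Int) (bits : List Int) : List Int :=
  ((PySem.List.enumerate bits s).filter (fun p => PySem.Int.mod p.1 3 == r)).map (·.2)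

lemma pvModify_red (r g b : List Int) (f : List Int → List Int) :
    (pvDictOf r g b).modify "red" [] f = pvDictOf (f r) g b := rfl

lemma pvModify_green (r g b : List Int) (f : List Int → List Int) :
    (pvDictOf r g b).modify "green" [] f = pvDictOf r (f g) b := rfl

lemma pvModify_blue (r g b : List Int) (f : List Int → List Int) :
    (pvDictOf r g b).modify "blue" [] f = pvDictOf r g (f b) := rfl

lemma pvPickF_cons (r s : Int) (x : Int) (xs : List Int) :
    pvPickF r s (x :: xs)
      = (if PySem.Int.mod s 3 == r then [x] else []) ++ pvPickF r (s + 1) xs := by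
  simp only [pvPickF, PySem.List.enumerate_cons, List.filter_cons]
  split_ifs with h <;> simp_all

lemma pvLoop (bits : List Int) : ∀ (s : Int), 0 ≤ s → ∀ (r g b : List Int),
    bits.foldl pvStepA (pvDictOf r g b, PySem.Int.mod s 3)
      = (pvDictOf (r ++ pvPickF 0 s bits) (g ++ pvPickF 1 s bits) (b ++ pvPickF 2 s bits),
         PySem.Int.mod (s + bits.length) 3) := by
  induction bits with
  | nil => intro s hs r g b; simp [pvPickF]
  | cons x xs ih =>
    intro s hs r g b
    have h3 : (0:Int) < 3 := by norm_num
    have hm := PySem.Int.mod_eq_emod_of_pos (a := s) h3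
    have hm1 := PySem.Int.mod_eq_emod_of_pos (a := s + 1) h3
    have hnn : 0 ≤ s % 3 := Int.emod_nonneg s (by norm_num)
    have hlt : s % 3 < 3 := Int.emod_lt_of_pos s h3
    rw [List.foldl_cons]
    rcases (by omega : s % 3 = 0 ∨ s % 3 = 1 ∨ s % 3 = 2) with h | h | h
    · have hstep : pvStepA (pvDictOf r g b, PySem.Int.mod s 3) x
          = (pvDictOf (r ++ [x]) g b, PySem.Int.mod (s + 1) 3) := by
        simp only [pvStepA, hm, h, hm1]
        rw [show PySem.List.pyGetD pvColorsOrder 0 "" = "red" from rfl, pvModify_red,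
            show PySem.List.len pvColorsOrder = (3:Int) from rfl]
        simp only [Prod.mk.injEq, true_and]
        norm_num
        omega
      rw [hstep, ih (s + 1) (by omega),
          show s + 1 + (xs.length : Int) = s + ((xs.length : Int) + 1) by ring]
      simp [pvPickF_cons, h, List.append_assoc]
    · have hstep : pvStepA (pvDictOf r g b, PySem.Int.mod s 3) x
          = (pvDictOf r (g ++ [x]) b, PySem.Int.mod (s + 1) 3) := by
        simp only [pvStepA, hm, h, hm1]
        rw [show PySem.List.pyGetD pvColorsOrder 1 "" = "green" from rfl, pvModify_green,
            show PySem.List.len pvColorsOrder = (3:Int) from rfl]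
        simp only [Prod.mk.injEq, true_and]
        norm_num
        omega
      rw [hstep, ih (s + 1) (by omega),
          show s + 1 + (xs.length : Int) = s + ((xs.length : Int) + 1) by ring]
      simp [pvPickF_cons, h, List.append_assoc]
    · have hstep : pvStepA (pvDictOf r g b, PySem.Int.mod s 3) x
          = (pvDictOf r g (b ++ [x]), PySem.Int.mod (s + 1) 3) := by
        simp only [pvStepA, hm, h, hm1]
        rw [show PySem.List.pyGetD pvColorsOrder 2 "" = "blue" from rfl, pvModify_blue,
            show PySem.List.len pvColorsOrder = (3:Int) from rfl]
        simp only [Prod.mk.injEq, true_and]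
        norm_num
        omega
      rw [hstep, ih (s + 1) (by omega),
          show s + 1 + (xs.length : Int) = s + ((xs.length : Int) + 1) by ring]
      simp [pvPickF_cons, h, List.append_assoc]

-- ===== VERDICT (by name: the statement is the Claim_ definition above) =====
theorem assign_bits_to_colors_spec : Claim_equal_assign_bits_to_colors := by
  intro bm _
  show assign_bits_to_colors bm = assign_bits_to_colors_alt bm
  have h0 : (0 : Int) = PySem.Int.mod 0 3 := rfl
  have := pvLoop bm 0 le_rfl [] [] []
  simp only [assign_bits_to_colors, assign_bits_to_colors_alt]
  rw [show (PySem.Dict.ofList [("red", ([] : List Int)), ("green", []), ("blue", [])], (0:Int))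
        = (pvDictOf [] [] [], PySem.Int.mod 0 3) from rfl, this]
  simp only [pvDictOf, pvPickF, pvPick, List.nil_append]
  rfl
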